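-- pv_equiv track=rewrite | github.com/vasabi-root/cpp_notes | practice/CodeRun/covering/main.py | coverage_bin_search
-- ===== SOURCE A (Python) =====
-- def coverage_bin_search(l: int, r: int, points: [], k: int):
--     while l < r:
--         m = (l+r) // 2
--
--         flag = 0
--         last = 0
--         for seg_i in range(k):
--             for i, p in enumerate(points[last:]):
--                 if p - points[last] > m:
--                     last += i
--                     break
--             else: # если не брэйкнулись на последней итерации
--                 if seg_i == k-1:
--                     flag = True
--                     break
--             flag = False
--
--         if flag:
--             r = m
--         else:
--             l = m+1
--     return l
-- ===== SOURCE B (Python) =====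
-- def coverage_bin_search(l: int, r: int, points: [], k: int):
--     n = len(points)
--
--     def feasible(m):
--         # greedy: count segments of span m needed, left to right
--         if k <= 0:
--             return False
--         if m < 0:
--             return n == 0
--         i = 0
--         segs = 0
--         while i < n:
--             segs += 1
--             if segs > k:
--                 return False
--             limit = points[i] + m
--             i += 1
--             while i < n and points[i] <= limit:
--                 i += 1
--         return True
--
--     while l < r:
--         m = (l + r) // 2
--         if feasible(m):
--             r = m
--         else:
--             l = m + 1
--     return l
-- ===== Notes on version B (the rewrite author's own statement) =====
-- stated objective: alternative
-- what changed: The feasibility check for a candidate span m is a single greedy left-to-right pass that counts segments with early exit, instead of A's k fixed iterations that each re-slice the tail points[last:] and rescan it with enumerate; it trades A's flag/for-else control for an explicit segment counter.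
import Mathlib
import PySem

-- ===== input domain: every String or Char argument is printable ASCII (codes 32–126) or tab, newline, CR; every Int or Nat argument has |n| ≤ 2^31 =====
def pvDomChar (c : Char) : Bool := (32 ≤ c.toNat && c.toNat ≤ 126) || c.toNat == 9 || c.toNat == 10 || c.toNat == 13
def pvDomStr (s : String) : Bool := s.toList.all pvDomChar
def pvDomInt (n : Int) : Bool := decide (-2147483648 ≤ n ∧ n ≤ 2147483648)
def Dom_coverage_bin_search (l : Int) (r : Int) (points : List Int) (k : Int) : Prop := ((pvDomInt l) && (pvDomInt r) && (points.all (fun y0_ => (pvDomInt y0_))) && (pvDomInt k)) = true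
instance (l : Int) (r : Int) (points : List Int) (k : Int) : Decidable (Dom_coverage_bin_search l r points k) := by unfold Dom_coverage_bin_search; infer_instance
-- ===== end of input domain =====

-- B replaces A's per-segment slicing scan (k fixed iterations over the tail with flag/for-else logic)
-- by a single greedy pass that counts segments with early exit (objective: alternative).

-- ===== PORT A =====
-- inner 'for i, p in enumerate(points[last:]): if p - points[last] > m: break' — returns the break index
def pvScanA : List Int → Int → Int → Nat → Option Nat
  | [], _, _, _ => none
  | p :: rest, base, m, i => if p - base > m then some i else pvScanA rest base m (i + 1)

-- 'for seg_i in range(k)' with the for-else and flag logic; c = remaining iterations (seg_i = kn - c)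
def pvSegLoop (points : List Int) (m : Int) (kn : Nat) : Nat → Nat → Bool → Bool
  | 0, _, flag => flag
  | c + 1, last, _ =>
    let seg_i := kn - (c + 1)
    match points.drop last with          -- points[last:]  (last ≥ 0 always, so drop is exact)
    | [] =>                              -- inner loop empty → for-else branch
      if seg_i = kn - 1 then true else pvSegLoop points m kn c last false
    | base :: rest =>                    -- base = points[last]
      match pvScanA (base :: rest) base m 0 with
      | some i => pvSegLoop points m kn c (last + i) false     -- broke: last += i
      | none => if seg_i = kn - 1 then true else pvSegLoop points m kn c last false

def coverage_bin_search (l : Int) (r : Int) (points : List Int) (k : Int) : Int :=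
  if h : l < r then
    let m := PySem.Int.floordiv (l + r) 2
    let flag := pvSegLoop points m k.toNat k.toNat 0 false
    if flag then coverage_bin_search l m points k
    else coverage_bin_search (m + 1) r points k
  else l
termination_by (r - l).toNat
decreasing_by
  · have := PySem.Int.floordiv_two_mid_bounds (le_of_lt h)
    have h2 : PySem.Int.floordiv (l + r) 2 < r := by
      rw [PySem.Int.floordiv_eq_ediv_of_pos (by omega)]; omega
    omega
  · have h1 : l ≤ PySem.Int.floordiv (l + r) 2 :=
      (PySem.Int.floordiv_two_mid_bounds (le_of_lt h)).1
    omega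

-- ===== PORT B =====
-- 'while i < n and points[i] <= limit: i += 1'
def pvAdvance (points : List Int) (limit : Int) (i : Nat) : Nat :=
  if h : i < points.length then
    if points[i] ≤ limit then pvAdvance points limit (i + 1) else i
  else i
termination_by points.length - i

theorem pvAdvance_ge (points : List Int) (limit : Int) (i : Nat) : i ≤ pvAdvance points limit i := by
  fun_induction pvAdvance points limit i with
  | case1 _ _ ih => omega
  | case2 => omega
  | case3 => omega

-- 'while i < n: segs += 1; if segs > k: return False; limit = points[i]+m; i += 1; advance'
def pvFeasLoop (points : List Int) (m : Int) (k : Int) (i : Nat) (segs : Int) : Bool :=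
  if h : i < points.length then
    if segs + 1 > k then false
    else pvFeasLoop points m k (pvAdvance points (points[i] + m) (i + 1)) (segs + 1)
  else true
termination_by points.length - i
decreasing_by
  have := pvAdvance_ge points (points[i] + m) (i + 1)
  omega

-- nested 'def feasible(m)'
def pvFeasB (points : List Int) (k : Int) (m : Int) : Bool :=
  if k ≤ 0 then false
  else if m < 0 then points.length == 0
  else pvFeasLoop points m k 0 0

def coverage_bin_search_alt (l : Int) (r : Int) (points : List Int) (k : Int) : Int :=
  if h : l < r then
    let m := PySem.Int.floordiv (l + r) 2
    if pvFeasB points k m then coverage_bin_search_alt l m points k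
    else coverage_bin_search_alt (m + 1) r points k
  else l
termination_by (r - l).toNat
decreasing_by
  · have h2 : PySem.Int.floordiv (l + r) 2 < r := by
      rw [PySem.Int.floordiv_eq_ediv_of_pos (by omega)]; omega
    omega
  · have h1 : l ≤ PySem.Int.floordiv (l + r) 2 :=
      (PySem.Int.floordiv_two_mid_bounds (le_of_lt h)).1
    omega

-- ===== PRECONDITION & SPEC =====
def Spec_coverage_bin_search (l : Int) (r : Int) (points : List Int) (k : Int) (out : Int) : Prop := out = coverage_bin_search_alt l r points k
instance (l : Int) (r : Int) (points : List Int) (k : Int) (out : Int) : Decidable (Spec_coverage_bin_search l r points k out) := by unfold Spec_coverage_bin_search; infer_instance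

-- ===== CLAIM (what is proved, stated in full; the proofs are below) =====
def Claim_equal_coverage_bin_search : Prop := ∀ (l : Int) (r : Int) (points : List Int) (k : Int), Dom_coverage_bin_search l r points k → Spec_coverage_bin_search l r points k (coverage_bin_search l r points k)

-- ===== LEMMAS AND PROOFS =====

-- one-step unfoldings of pvSegLoop (used instead of simp-unfolding, which recurses)
theorem pvSegLoop_zero (points : List Int) (m : Int) (kn last : Nat) (flag : Bool) :
    pvSegLoop points m kn 0 last flag = flag := rfl

theorem pvSegLoop_succ (points : List Int) (m : Int) (kn c last : Nat) (flag : Bool) :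
    pvSegLoop points m kn (c + 1) last flag =
      (match points.drop last with
       | [] => if kn - (c + 1) = kn - 1 then true else pvSegLoop points m kn c last false
       | base :: rest =>
         match pvScanA (base :: rest) base m 0 with
         | some i => pvSegLoop points m kn c (last + i) false
         | none => if kn - (c + 1) = kn - 1 then true else pvSegLoop points m kn c last false) := rfl

-- common "first index satisfying pred" spec
def pvFind (pred : Int → Bool) : List Int → Option Nat
  | [] => none
  | p :: rest => if pred p then some 0 else (pvFind pred rest).map (· + 1)

theorem pvScanA_eq_find (base m : Int) (sub : List Int) (j : Nat) :
    pvScanA sub base m j = (pvFind (fun p => decide (p - base > m)) sub).map (· + j) := by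
  induction sub generalizing j with
  | nil => simp [pvScanA, pvFind]
  | cons p rest ih =>
    simp only [pvScanA, pvFind]
    by_cases hp : p - base > m
    · simp [hp]
    · simp only [hp, decide_eq_true_eq, if_neg, not_false_iff]
      rw [ih (j + 1)]
      cases h2 : pvFind (fun p => decide (p - base > m)) rest with
      | none => simp [hp]
      | some t =>
        simp only [hp, decide_false, Bool.false_eq_true, if_false, Option.map_some]
        congr 1
        omega

theorem pvFind_lt (pred : Int → Bool) (sub : List Int) (t : Nat)
    (h : pvFind pred sub = some t) : t < sub.length := by
  induction sub generalizing t with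
  | nil => simp [pvFind] at h
  | cons p rest ih =>
    rw [pvFind] at h
    by_cases hp : pred p
    · rw [if_pos hp] at h
      cases h
      simp
    · rw [if_neg hp] at h
      cases hf : pvFind pred rest with
      | none => rw [hf] at h; simp at h
      | some u =>
        rw [hf] at h
        simp only [Option.map_some, Option.some.injEq] at h
        have := ih u hf
        simp only [List.length_cons]
        omega

theorem pvAdvance_eq_find (points : List Int) (limit : Int) (i : Nat) (hi : i ≤ points.length) :
    pvAdvance points limit i =
      (pvFind (fun p => decide (p > limit)) (points.drop i)).elim points.length (fun t => i + t) := by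
  fun_induction pvAdvance points limit i with
  | case1 i h hle ih =>
    rw [List.drop_eq_getElem_cons h]
    simp only [pvFind]
    have hnot : ¬ ((points[i] : Int) > limit) := by omega
    simp only [hnot, decide_false, Bool.false_eq_true, if_false]
    rw [ih (by omega)]
    cases h2 : pvFind (fun p => decide (p > limit)) (points.drop (i + 1)) with
    | none => simp [h2]
    | some t => simp [h2]; omega
  | case2 i h hgt =>
    rw [List.drop_eq_getElem_cons h]
    simp only [pvFind]
    have : (points[i] : Int) > limit := by omega
    simp [this]
  | case3 i h =>
    have : i = points.length := by omega
    subst this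
    simp [pvFind]

-- the two break predicates are the same function
theorem pred_eq (base m : Int) :
    (fun p => decide (p - base > m)) = (fun p => decide (p > base + m)) := by
  funext p
  exact decide_eq_decide.mpr (by omega)

-- tail from 'last' fits in one segment (or is empty) → A's remaining loop always ends with flag=True
theorem pvSegLoop_allfits (points : List Int) (m : Int) (kn : Nat) (last : Nat) (flag : Bool)
    (hfit : points.drop last = [] ∨
      (∃ base rest, points.drop last = base :: rest ∧ pvScanA (base :: rest) base m 0 = none)) :
    ∀ c, pvSegLoop points m kn (c + 1) last flag = true := by
  intro c
  induction c generalizing flag with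
  | zero =>
    rcases hfit with h | ⟨base, rest, h, hs⟩
    · simp [pvSegLoop_succ, h]
    · simp [pvSegLoop_succ, h, hs]
  | succ c ih =>
    rcases hfit with h | ⟨base, rest, h, hs⟩
    · rw [pvSegLoop_succ]
      simp only [h]
      split
      · rfl
      · exact ih false
    · rw [pvSegLoop_succ]
      simp only [h, hs]
      split
      · rfl
      · exact ih false

-- m < 0 and a point remains → A's loop never advances, ends with flag=False
theorem pvSegLoop_neg (points : List Int) (m : Int) (kn : Nat) (last : Nat)
    (hm : m < 0) (hne : points.drop last ≠ []) :
    ∀ c, pvSegLoop points m kn c last false = false := by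
  intro c
  induction c with
  | zero => rfl
  | succ c ih =>
    obtain ⟨base, rest, h⟩ : ∃ base rest, points.drop last = base :: rest := by
      cases hh : points.drop last with
      | nil => exact absurd hh hne
      | cons a b => exact ⟨a, b, rfl⟩
    have hscan : pvScanA (base :: rest) base m 0 = some 0 := by
      simp [pvScanA]
      omega
    rw [pvSegLoop_succ]
    simp only [h, hscan]
    simpa using ih

-- main correspondence for m ≥ 0, k ≥ 1
theorem pvSegLoop_eq_feas (points : List Int) (m k : Int) (hm : 0 ≤ m) (hk : 1 ≤ k) :
    ∀ c last, c ≤ k.toNat → (c = 0 → last < points.length) →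
      pvSegLoop points m k.toNat c last false = pvFeasLoop points m k last (k - c) := by
  intro c
  induction c with
  | zero =>
    intro last _ hlast
    have h := hlast rfl
    rw [pvFeasLoop]
    simp only [h, dif_pos]
    have hgt : k - ((0 : Nat) : Int) + 1 > k := by push_cast; omega
    rw [if_pos hgt, pvSegLoop_zero]
  | succ c ih =>
    intro last hc hlast
    by_cases hlt : last < points.length
    · have hdrop : points.drop last = points[last] :: points.drop (last + 1) :=
        List.drop_eq_getElem_cons hlt
      rw [pvFeasLoop]
      simp only [hlt, dif_pos]
      have hcnt : ¬ (k - (↑(c + 1) : Int) + 1 > k) := by push_cast; omega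
      rw [if_neg hcnt]
      rw [pvSegLoop_succ]
      simp only [hdrop]
      rw [pvScanA_eq_find, pred_eq points[last] m]
      have hadv := pvAdvance_eq_find points (points[last] + m) (last + 1) (by omega)
      have hhead : ¬ ((points[last] : Int) > points[last] + m) := by omega
      have hfind : pvFind (fun p => decide (p > points[last] + m)) (points[last] :: points.drop (last + 1))
          = (pvFind (fun p => decide (p > points[last] + m)) (points.drop (last + 1))).map (· + 1) := by
        simp only [pvFind, hhead, decide_false, Bool.false_eq_true, if_false]
      cases hrest : pvFind (fun p => decide (p > points[last] + m)) (points.drop (last + 1)) with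
      | none =>
        rw [hrest] at hfind hadv
        simp only [Option.map_none] at hfind
        simp only [Option.elim_none] at hadv
        have hBtrue : pvFeasLoop points m k (pvAdvance points (points[last] + m) (last + 1)) (k - ↑(c + 1) + 1) = true := by
          rw [hadv, pvFeasLoop]
          simp
        rw [hBtrue, hfind]
        simp only [Option.map_none]
        split
        · rfl
        · cases c with
          | zero => omega
          | succ c' =>
            apply pvSegLoop_allfits
            right
            refine ⟨points[last], points.drop (last + 1), hdrop, ?_⟩
            rw [pvScanA_eq_find, pred_eq points[last] m, hfind]
            rfl
      | some t =>
        rw [hrest] at hfind hadv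
        rw [hfind]
        simp only [Option.map_some]
        have ht : t < (points.drop (last + 1)).length := pvFind_lt _ _ _ hrest
        have hlen : last + 1 + t < points.length := by
          simp at ht
          omega
        have hih := ih (last + (t + 1)) (by omega) (by intro _; omega)
        have hadv2 : pvAdvance points (points[last] + m) (last + 1) = last + (t + 1) := by
          rw [hadv]
          simp only [Option.elim_some]
          omega
        simp only [Nat.add_zero]
        rw [hadv2, hih]
        congr 1
        push_cast
        ring
    · have hdrop : points.drop last = [] := List.drop_eq_nil_of_le (by omega)
      rw [pvFeasLoop]
      simp only [hlt, dif_neg, not_false_iff]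
      exact pvSegLoop_allfits points m k.toNat last false (Or.inl hdrop) c

-- the two feasibility checks agree for every m
theorem feas_eq (points : List Int) (k m : Int) :
    pvSegLoop points m k.toNat k.toNat 0 false = pvFeasB points k m := by
  unfold pvFeasB
  by_cases hk : k ≤ 0
  · have hk0 : k.toNat = 0 := by omega
    rw [if_pos hk, hk0, pvSegLoop_zero]
  · rw [if_neg hk]
    have hk1 : 1 ≤ k := by omega
    have hkn : 1 ≤ k.toNat := by omega
    by_cases hm : m < 0
    · rw [if_pos hm]
      cases hpts : points with
      | nil =>
        obtain ⟨c, hc⟩ : ∃ c, k.toNat = c + 1 := ⟨k.toNat - 1, by omega⟩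
        rw [hc]
        rw [pvSegLoop_allfits [] m (c + 1) 0 false (Or.inl rfl) c]
        simp
      | cons a rest =>
        rw [pvSegLoop_neg (a :: rest) m k.toNat 0 hm (by simp) k.toNat]
        simp
    · rw [if_neg hm]
      rw [pvSegLoop_eq_feas points m k (by omega) hk1 k.toNat 0 (le_refl _) (by omega)]
      congr 1
      omega

theorem cov_eq_aux (n : Nat) : ∀ (l r : Int), (r - l).toNat ≤ n → ∀ (points : List Int) (k : Int),
    coverage_bin_search l r points k = coverage_bin_search_alt l r points k := by
  induction n with
  | zero =>
    intro l r hn points k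
    have h : ¬ l < r := by omega
    rw [coverage_bin_search, coverage_bin_search_alt, dif_neg h, dif_neg h]
  | succ n ihn =>
    intro l r hn points k
    by_cases h : l < r
    · have hmid := PySem.Int.floordiv_two_mid_bounds (le_of_lt h)
      have hlt : PySem.Int.floordiv (l + r) 2 < r := by
        rw [PySem.Int.floordiv_eq_ediv_of_pos (by omega)]
        omega
      rw [coverage_bin_search, coverage_bin_search_alt]
      simp only [h, dif_pos]
      rw [← feas_eq points k (PySem.Int.floordiv (l + r) 2)]
      by_cases hf : pvSegLoop points (PySem.Int.floordiv (l + r) 2) k.toNat k.toNat 0 false = true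
      · simp only [hf, if_pos]
        exact ihn l (PySem.Int.floordiv (l + r) 2) (by omega) points k
      · simp only [Bool.not_eq_true] at hf
        simp only [hf, Bool.false_eq_true, if_false]
        exact ihn (PySem.Int.floordiv (l + r) 2 + 1) r (by omega) points k
    · rw [coverage_bin_search, coverage_bin_search_alt, dif_neg h, dif_neg h]

-- ===== VERDICT (by name: the statement is the Claim_ definition above) =====
theorem coverage_bin_search_spec : Claim_equal_coverage_bin_search := by
  intro l r points k _
  exact cov_eq_aux (r - l).toNat l r (le_refl _) points k
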